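-- pv_equiv track=rewrite | github.com/hedge0207/algorithm | leetcode/2284_Sender_With_Largest_Word_Count.py | largestWordCount
-- ===== SOURCE A (Python) =====
-- from collections import defaultdict
--
-- def largestWordCount(messages: list[str], senders: list[str]) -> str:
--     num_words_per_users = defaultdict(int)
--     ans = ""
--     max_cnt = 0
--     for i in range(len(messages)):
--         num_words_per_users[senders[i]] += len(messages[i].split())
--         if num_words_per_users[senders[i]] > max_cnt:
--             max_cnt = num_words_per_users[senders[i]]
--             ans = senders[i]
--         elif num_words_per_users[senders[i]] == max_cnt:
--             if ans < senders[i]: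
--                 ans = senders[i]
--
--     return ans
-- ===== SOURCE B (Python) =====
-- def largestWordCount(messages: list[str], senders: list[str]) -> str:
--     counts = {}
--     for msg, snd in zip(messages, senders):
--         counts[snd] = counts.get(snd, 0) + len(msg.split())
--     if not counts:
--         return ""
--     return max(counts, key=lambda s: (counts[s], s))
-- ===== Notes on version B (the rewrite author's own statement) =====
-- stated objective: simpler
-- what changed: A interleaves count accumulation with running-max/tie tracking in one indexed loop; B first builds the word-count dict over zip(messages, senders) and then picks max(counts, key=lambda s: (counts[s], s)) in a separate phase.
import Mathlib
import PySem

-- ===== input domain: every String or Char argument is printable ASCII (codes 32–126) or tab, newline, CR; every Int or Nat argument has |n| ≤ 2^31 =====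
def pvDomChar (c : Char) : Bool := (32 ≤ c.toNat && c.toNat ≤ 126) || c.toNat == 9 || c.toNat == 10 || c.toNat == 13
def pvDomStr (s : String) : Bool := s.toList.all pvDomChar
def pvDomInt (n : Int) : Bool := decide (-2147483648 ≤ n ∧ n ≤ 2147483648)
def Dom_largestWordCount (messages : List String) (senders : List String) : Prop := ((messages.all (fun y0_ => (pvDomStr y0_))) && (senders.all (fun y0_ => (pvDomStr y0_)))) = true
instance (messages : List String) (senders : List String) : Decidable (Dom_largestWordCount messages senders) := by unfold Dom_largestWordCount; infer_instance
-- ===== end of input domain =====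

-- B builds the word-count dict in one pass over zip(messages, senders), then picks the best sender
-- by max with key (count, name) in a separate phase ('simpler'); equal to A on all inputs where A returns.
-- ===== PORT A =====
-- step of A's loop body: state = (num_words_per_users, ans, max_cnt)
def pvStepA (st : PySem.Dict String Int × String × Int) (p : String × String) :
    PySem.Dict String Int × String × Int :=
  let d := st.1.modify p.2 0 (fun c => c + ((PySem.Str.split₀ p.1).length : Int))
  let c := d.getD p.2 0
  if c > st.2.2 then (d, p.2, c)
  else if c = st.2.2 then (d, (if st.2.1 < p.2 then p.2 else st.2.1), st.2.2)
  else (d, st.2.1, st.2.2)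

def largestWordCount (messages : List String) (senders : List String) : String :=
  -- for i in range(len(messages)): indexing both lists; pyGet? = none is Python's IndexError,
  -- excluded by Pre_; the 'st' fallback only makes the fold total.
  let st := (PySem.List.pyRange 0 messages.length).foldl
    (fun st i =>
      match PySem.List.pyGet? messages i, PySem.List.pyGet? senders i with
      | some m, some s => pvStepA st (m, s)
      | _, _ => st)
    (PySem.Dict.empty, "", 0)
  st.2.1

-- ===== PORT B =====
def largestWordCount_alt (messages : List String) (senders : List String) : String :=
  let counts := (messages.zip senders).foldl
    (fun (d : PySem.Dict String Int) p =>
      d.modify p.2 0 (fun c => c + ((PySem.Str.split₀ p.1).length : Int)))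
    PySem.Dict.empty
  if counts.size = 0 then ""
  else
    match PySem.List.max2? counts.keys (fun s => counts.getD s 0) (fun s => s) with
    | some s => s
    | none => ""

-- ===== PRECONDITION & SPEC =====
-- Pre_ excludes exactly the inputs where A raises IndexError (senders shorter than messages).
def Pre_largestWordCount (messages : List String) (senders : List String) : Prop :=
  messages.length ≤ senders.length
instance (messages : List String) (senders : List String) :
    Decidable (Pre_largestWordCount messages senders) := by
  unfold Pre_largestWordCount; infer_instance
def pvWitness_largestWordCount : List String × List String := (["hello world", "hi"], ["alice", "bob"])

def Spec_largestWordCount (messages : List String) (senders : List String) (out : String) : Prop := out = largestWordCount_alt messages senders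
instance (messages : List String) (senders : List String) (out : String) : Decidable (Spec_largestWordCount messages senders out) := by unfold Spec_largestWordCount; infer_instance

-- ===== CLAIM (what is proved, stated in full; the proofs are below) =====
def Claim_equal_largestWordCount : Prop := ∀ (messages : List String) (senders : List String), Dom_largestWordCount messages senders → Pre_largestWordCount messages senders → Spec_largestWordCount messages senders (largestWordCount messages senders)

-- ===== LEMMAS AND PROOFS =====

-- word count of a message, and the dict step shared syntactically by both ports
def pvW (m : String) : Int := ((PySem.Str.split₀ m).length : Int)

def pvStepD (d : PySem.Dict String Int) (p : String × String) : PySem.Dict String Int :=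
  d.modify p.2 0 (fun c => c + ((PySem.Str.split₀ p.1).length : Int))

-- strict "better" order used by Python's max with key (count, name)
def pvLt (c : String → Int) (y a : String) : Prop := c y < c a ∨ (c y = c a ∧ y < a)

def pvBet (c : String → Int) (m x : String) : Bool :=
  decide (c m < c x) || (!decide (c x < c m) && decide (m < x))

def pvMaxRun (c : String → Int) (m : String) (t : List String) : String :=
  t.foldl (fun m x => if pvBet c m x then x else m) m

theorem pvBet_iff (c : String → Int) (m x : String) : pvBet c m x = true ↔ pvLt c m x := by
  unfold pvBet pvLt
  simp only [Bool.or_eq_true, Bool.and_eq_true, Bool.not_eq_true', decide_eq_true_iff,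
    decide_eq_false_iff_not]
  constructor
  · rintro (h | ⟨h1, h2⟩)
    · exact Or.inl h
    · rcases lt_trichotomy (c m) (c x) with h' | h' | h'
      · exact Or.inl h'
      · exact Or.inr ⟨h', h2⟩
      · exact absurd h' h1
  · rintro (h | ⟨h1, h2⟩)
    · exact Or.inl h
    · exact Or.inr ⟨by omega, h2⟩

theorem pvLt_asymm (c : String → Int) (m x : String) (h : pvLt c m x) : ¬ pvLt c x m := by
  unfold pvLt at *
  rintro (h' | ⟨h1', h2'⟩) <;> rcases h with h | ⟨h1, h2⟩ <;> try omega
  exact absurd h2' (lt_asymm h2)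

theorem pvMaxRun_reach (c : String → Int) (a : String) :
    ∀ (t : List String) (m : String), (m = a ∨ a ∈ t) → (m ≠ a → pvLt c m a) →
      (∀ y ∈ t, y ≠ a → pvLt c y a) → pvMaxRun c m t = a := by
  intro t
  induction t with
  | nil =>
    intro m hmem _ _
    rcases hmem with h | h
    · simpa [pvMaxRun] using h
    · simp at h
  | cons z t' ih =>
    intro m hmem hm ht
    have hz : z ≠ a → pvLt c z a := fun h => ht z (by simp) h
    have ht' : ∀ y ∈ t', y ≠ a → pvLt c y a := fun y hy => ht y (by simp [hy])
    show pvMaxRun c (if pvBet c m z then z else m) t' = a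
    by_cases hmz : pvBet c m z = true
    · rw [if_pos hmz]
      apply ih
      · by_cases hza : z = a
        · exact Or.inl hza
        · -- m ≠ a here: if m = a then pvBet a z means pvLt a z, contradicting pvLt z a
          rcases hmem with h | h
          · exfalso
            subst h
            exact pvLt_asymm c z m (hz hza) ((pvBet_iff c m z).1 hmz)
          · rcases List.mem_cons.1 h with h' | h'
            · exact absurd h'.symm hza
            · exact Or.inr h'
      · intro h; exact hz h
      · exact ht'
    · rw [if_neg hmz]
      apply ih
      · rcases hmem with h | h
        · exact Or.inl h
        · rcases List.mem_cons.1 h with h' | h'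
          · -- z = a: then pvLt m a unless m = a; but ¬pvBet m z; if m ≠ a then pvLt m a = pvLt m z so pvBet holds
            by_cases hma : m = a
            · exact Or.inl hma
            · exact absurd ((pvBet_iff c m z).2 (by rw [← h']; exact hm hma)) hmz
          · exact Or.inr h'
      · exact hm
      · exact ht'

theorem pvMax2?_cons (c : String → Int) (x : String) (t : List String) :
    PySem.List.max2? (x :: t) c (fun s => s) = some (pvMaxRun c x t) := by
  unfold PySem.List.max2?
  simp only [List.foldl_cons]
  induction t generalizing x with
  | nil => simp [pvMaxRun]
  | cons z t' ih =>
    simp only [List.foldl_cons]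
    by_cases h : (decide (c x < c z) || (!decide (c z < c x) && decide (x < z))) = true
    · rw [if_pos h, show pvMaxRun c x (z :: t') = pvMaxRun c z t' from by
        unfold pvMaxRun; rw [List.foldl_cons, if_pos (show pvBet c x z = true from h)]]
      exact ih z
    · rw [if_neg h, show pvMaxRun c x (z :: t') = pvMaxRun c x t' from by
        unfold pvMaxRun; rw [List.foldl_cons, if_neg (show ¬ pvBet c x z = true from h)]]
      exact ih x

-- the running (ans, max_cnt) invariant of A's loop, relative to the counts dict
def pvInv (d : PySem.Dict String Int) (ans : String) (mc : Int) : Prop :=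
  (d.keys = [] ∧ ans = "" ∧ mc = 0) ∨
  (ans ∈ d.keys ∧ d.getD ans 0 = mc ∧
    ∀ s ∈ d.keys, s ≠ ans → pvLt (fun s => d.getD s 0) s ans)

theorem pvEmpty_le (k : String) (h : ¬ ("" : String) < k) : k = "" := by
  cases hk : k.toList with
  | nil => exact String.toList_inj.mp (by simp [hk])
  | cons c cs =>
    exfalso
    apply h
    rw [String.lt_iff_toList_lt, hk]
    simp [List.nil_lt_cons]

theorem pvStepA_fst (st : PySem.Dict String Int × String × Int) (p : String × String) :
    (pvStepA st p).1 = pvStepD st.1 p := by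
  rcases st with ⟨d, ans, mc⟩
  simp only [pvStepA, pvStepD]
  split_ifs <;> rfl

theorem pvStepA_inv (d : PySem.Dict String Int) (ans : String) (mc : Int) (p : String × String)
    (h : pvInv d ans mc) :
    pvInv (pvStepA (d, ans, mc) p).1 (pvStepA (d, ans, mc) p).2.1 (pvStepA (d, ans, mc) p).2.2 := by
  have hw : (0:ℤ) ≤ ((PySem.Str.split₀ p.1).length : ℤ) := Int.natCast_nonneg _
  set w : ℤ := ((PySem.Str.split₀ p.1).length : ℤ) with hwdef
  set d' := d.modify p.2 0 (fun c => c + w) with hd'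
  have hc : d'.getD p.2 0 = d.getD p.2 0 + w := PySem.Dict.getD_modify_self d p.2 0 _
  have hmem : ∀ s, s ∈ d'.keys ↔ s = p.2 ∨ s ∈ d.keys := by
    intro s
    rw [hd', PySem.Dict.keys_modify]
    exact PySem.Dict.mem_keys_insert d p.2 s _
  have hne : ∀ s, s ≠ p.2 → d'.getD s 0 = d.getD s 0 :=
    fun s hs => PySem.Dict.getD_modify_of_ne d 0 (fun c => c + w) hs
  have hstep : pvStepA (d, ans, mc) p =
      if d'.getD p.2 0 > mc then (d', p.2, d'.getD p.2 0)
      else if d'.getD p.2 0 = mc then (d', (if ans < p.2 then p.2 else ans), mc)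
      else (d', ans, mc) := rfl
  rw [hstep]
  split_ifs with h1 h2 hlt
  · -- new strict maximum: state becomes (d', p.2, new count)
    dsimp only
    refine Or.inr ⟨(hmem p.2).2 (Or.inl rfl), rfl, ?_⟩
    intro s hs hsne
    have hs' : s ∈ d.keys := ((hmem s).1 hs).resolve_left hsne
    have hsv : d'.getD s 0 = d.getD s 0 := hne s hsne
    simp only [pvLt]
    left
    rw [hsv]
    rcases h with ⟨hk0, _, _⟩ | ⟨hans, hmc, hall⟩
    · rw [hk0] at hs'; cases hs'
    · by_cases hsa : s = ans
      · rw [hsa, hmc]; omega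
      · have h3 := hall s hs' hsa
        simp only [pvLt] at h3
        rcases h3 with h' | ⟨h', _⟩ <;> omega
  · -- tie, and the new sender is lexicographically larger: ans becomes p.2
    dsimp only
    refine Or.inr ⟨(hmem p.2).2 (Or.inl rfl), h2, ?_⟩
    intro s hs hsne
    have hs' : s ∈ d.keys := ((hmem s).1 hs).resolve_left hsne
    have hsv : d'.getD s 0 = d.getD s 0 := hne s hsne
    simp only [pvLt]
    rcases h with ⟨hk0, hans0, hmc0⟩ | ⟨hans, hmc, hall⟩
    · rw [hk0] at hs'; cases hs'
    · by_cases hsa : s = ans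
      · right
        refine ⟨by rw [hsv, hsa, hmc, h2], ?_⟩
        rw [hsa]; exact hlt
      · have h3 := hall s hs' hsa
        simp only [pvLt] at h3
        rcases h3 with h' | ⟨h', h''⟩
        · left; rw [hsv, h2]; omega
        · right
          exact ⟨by rw [hsv, h', h2]; exact hmc, lt_trans h'' hlt⟩
  · -- tie, ans stays
    dsimp only
    rcases h with ⟨hk0, hans0, hmc0⟩ | ⟨hans, hmc, hall⟩
    · -- dict was empty, so ans = "" and p.2 must be "" since ¬(ans < p.2)
      subst hans0
      have hp2 : p.2 = "" := pvEmpty_le p.2 hlt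
      refine Or.inr ⟨(hmem "").2 (Or.inl hp2.symm), by rw [← hp2]; exact h2, ?_⟩
      intro s hs hsne
      exfalso
      have hs' : s ∈ d.keys := ((hmem s).1 hs).resolve_left (by rw [hp2]; exact hsne)
      rw [hk0] at hs'; cases hs'
    · have hansv : d'.getD ans 0 = mc := by
        by_cases hak : ans = p.2
        · rw [hak, h2]
        · rw [hne ans hak]; exact hmc
      refine Or.inr ⟨(hmem ans).2 (Or.inr hans), hansv, ?_⟩
      intro s hs hsne
      simp only [pvLt]
      by_cases hsk : s = p.2
      · right
        refine ⟨by rw [hsk, h2, hansv], ?_⟩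
        rw [hsk]
        exact lt_of_le_of_ne (le_of_not_gt hlt) (by rw [← hsk]; exact hsne)
      · have hs' : s ∈ d.keys := ((hmem s).1 hs).resolve_left hsk
        have hsv : d'.getD s 0 = d.getD s 0 := hne s hsk
        have h3 := hall s hs' hsne
        simp only [pvLt] at h3
        rcases h3 with h' | ⟨h', h''⟩
        · left; rw [hsv, hansv]; omega
        · right; exact ⟨by rw [hsv, hansv, h', hmc], h''⟩
  · -- count stays below the maximum: state unchanged apart from the dict
    dsimp only
    rcases h with ⟨hk0, hans0, hmc0⟩ | ⟨hans, hmc, hall⟩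
    · exfalso
      have hitems : d.items = [] := by simpa [PySem.Dict.keys] using hk0
      have hz : d.getD p.2 0 = 0 := by
        rcases d with ⟨items⟩
        subst hitems
        simp [PySem.Dict.getD, PySem.Dict.get?]
      omega
    · have hak : ans ≠ p.2 := by
        intro hEq
        rw [hEq] at hmc
        omega
      have hansv : d'.getD ans 0 = mc := by rw [hne ans hak]; exact hmc
      refine Or.inr ⟨(hmem ans).2 (Or.inr hans), hansv, ?_⟩
      intro s hs hsne
      simp only [pvLt]
      by_cases hsk : s = p.2
      · left
        rw [hsk, hansv]
        exact lt_of_le_of_ne (le_of_not_gt h1) h2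
      · have hs' : s ∈ d.keys := ((hmem s).1 hs).resolve_left hsk
        have hsv : d'.getD s 0 = d.getD s 0 := hne s hsk
        have h3 := hall s hs' hsne
        simp only [pvLt] at h3
        rcases h3 with h' | ⟨h', h''⟩
        · left; rw [hsv, hansv]; omega
        · right; exact ⟨by rw [hsv, hansv, h', hmc], h''⟩

theorem pvFoldA_inv :
    ∀ (zs : List (String × String)) (st : PySem.Dict String Int × String × Int),
      pvInv st.1 st.2.1 st.2.2 →
      pvInv (zs.foldl pvStepA st).1 (zs.foldl pvStepA st).2.1 (zs.foldl pvStepA st).2.2 := by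
  intro zs
  induction zs with
  | nil => intro st h; exact h
  | cons p t ih =>
    intro st h
    simp only [List.foldl_cons]
    exact ih _ (by rcases st with ⟨d, ans, mc⟩; exact pvStepA_inv d ans mc p h)

theorem pvFoldA_fst :
    ∀ (zs : List (String × String)) (st : PySem.Dict String Int × String × Int),
      (zs.foldl pvStepA st).1 = zs.foldl pvStepD st.1 := by
  intro zs
  induction zs with
  | nil => intro st; rfl
  | cons p t ih =>
    intro st
    simp only [List.foldl_cons, ih, pvStepA_fst]

theorem pvPyRange_natCast (n : ℕ) :
    PySem.List.pyRange 0 (↑n) = List.map (fun k : ℕ => (k : ℤ)) (List.range n) := by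
  unfold PySem.List.pyRange
  rcases Nat.eq_zero_or_pos n with h | h
  · subst h; simp
  · have h1 : (0:ℤ) < ↑n := by exact_mod_cast h
    simp only [if_neg (by norm_num : ¬ (1:ℤ) = 0), if_pos (by norm_num : (0:ℤ) < 1), if_pos h1]
    have : (((n:ℤ) - 0 + 1 - 1) / 1).toNat = n := by simp
    rw [this]
    simp

theorem pvFoldl_range_get {α β : Type} (zs : List α) (f : β → α → β) (init : β) :
    (List.range zs.length).foldl
      (fun st k => match zs[k]? with | some z => f st z | none => st) init =
    zs.foldl f init := by
  induction zs using List.reverseRecOn generalizing init with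
  | nil => simp
  | append_singleton t z ih =>
    rw [List.length_append, List.length_singleton, List.range_succ, List.foldl_append,
      List.foldl_append]
    have hcong : (List.range t.length).foldl
        (fun st k => match (t ++ [z])[k]? with | some z => f st z | none => st) init =
        (List.range t.length).foldl
        (fun st k => match t[k]? with | some z => f st z | none => st) init := by
      apply PySem.List.foldl_congr_mem
      intro acc k hk
      rw [List.getElem?_append_left (List.mem_range.1 hk)]
    rw [hcong, ih]
    simp

theorem pvIndexFold_eq_zipFold (messages senders : List String)
    (h : messages.length ≤ senders.length)
    (init : PySem.Dict String Int × String × Int) :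
    (PySem.List.pyRange 0 (↑messages.length)).foldl
      (fun st i =>
        match PySem.List.pyGet? messages i, PySem.List.pyGet? senders i with
        | some m, some s => pvStepA st (m, s)
        | _, _ => st) init =
    (messages.zip senders).foldl pvStepA init := by
  rw [pvPyRange_natCast, List.foldl_map,
    ← pvFoldl_range_get (messages.zip senders) pvStepA init]
  have hlen : (messages.zip senders).length = messages.length := by
    rw [List.length_zip]; omega
  rw [hlen]
  apply PySem.List.foldl_congr_mem
  intro acc k hk
  have hk' : k < messages.length := List.mem_range.1 hk
  have hks : k < senders.length := by omega
  have hkz : k < (messages.zip senders).length := by omega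
  rw [PySem.List.pyGet?_natCast, PySem.List.pyGet?_natCast,
    List.getElem?_eq_getElem hk', List.getElem?_eq_getElem hks,
    List.getElem?_eq_getElem hkz, List.getElem_zip]

theorem pvKeys_nil_iff (d : PySem.Dict String Int) : d.keys = [] ↔ d.size = 0 := by
  show d.items.map (·.1) = [] ↔ d.items.length = 0
  simp


-- ===== VERDICT (by name: the statement is the Claim_ definition above) =====
theorem largestWordCount_spec : Claim_equal_largestWordCount := by
  intro messages senders _ hpre
  show largestWordCount messages senders = largestWordCount_alt messages senders
  unfold largestWordCount largestWordCount_alt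
  rw [pvIndexFold_eq_zipFold messages senders hpre]
  set zs := messages.zip senders with hzs
  set final := zs.foldl pvStepA (PySem.Dict.empty, "", 0) with hfinal
  have hfst : zs.foldl
      (fun (d : PySem.Dict String Int) p =>
        d.modify p.2 0 (fun c => c + ((PySem.Str.split₀ p.1).length : Int)))
      PySem.Dict.empty = final.1 := (pvFoldA_fst zs (PySem.Dict.empty, "", 0)).symm
  have hinv : pvInv final.1 final.2.1 final.2.2 :=
    pvFoldA_inv zs _ (Or.inl ⟨rfl, rfl, rfl⟩)
  dsimp only
  rw [hfst]
  rcases hinv with ⟨hk0, hans, hmc⟩ | ⟨hansm, hmcv, hall⟩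
  · rw [hans, if_pos ((pvKeys_nil_iff final.1).1 hk0)]
  · have hsz : ¬ final.1.size = 0 := by
      intro h0
      rw [(pvKeys_nil_iff final.1).2 h0] at hansm
      cases hansm
    rw [if_neg hsz]
    rcases hk : final.1.keys with _ | ⟨x, t⟩
    · rw [hk] at hansm; cases hansm
    · rw [hk] at hansm hall
      rw [pvMax2?_cons]
      show final.2.1 = pvMaxRun (fun s => final.1.getD s 0) x t
      symm
      apply pvMaxRun_reach
      · rcases List.mem_cons.1 hansm with h' | h'
        · exact Or.inl h'.symm
        · exact Or.inr h'
      · intro hx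
        exact hall x (by simp) hx
      · intro y hy hyne
        exact hall y (by simp [hy]) hyne
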